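-- pv_equiv track=rewrite | github.com/genndy007/LABS_ASU_9X | DS_LABS/DS_Lab2/source.py | find_tiers
-- ===== SOURCE A (Python) =====
-- def find_tiers(matr_dist):
--     result = []
--     for i in range(len(matr_dist)):
--         tiers = {}
--         for j in range(len(matr_dist[i])):
--             if tiers.get(matr_dist[i][j]) is None:
--                 tiers[matr_dist[i][j]] = [j + 1]
--             else:
--                 tiers[matr_dist[i][j]].append(j + 1)
--         result.append(tiers)
--     return result
-- ===== SOURCE B (Python) =====
-- def find_tiers(matr_dist):
--     return [{v: [j + 1 for j, x in enumerate(row) if x == v]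
--              for v in dict.fromkeys(row)}
--             for row in matr_dist]
-- ===== Notes on version B (the rewrite author's own statement) =====
-- stated objective: simpler
-- what changed: Replaces the incremental get-then-insert-or-append dict building with a per-row comprehension: dedup the row's values in first-appearance order, then for each distinct value collect all matching 1-based column indices in one scan.
import Mathlib
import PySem

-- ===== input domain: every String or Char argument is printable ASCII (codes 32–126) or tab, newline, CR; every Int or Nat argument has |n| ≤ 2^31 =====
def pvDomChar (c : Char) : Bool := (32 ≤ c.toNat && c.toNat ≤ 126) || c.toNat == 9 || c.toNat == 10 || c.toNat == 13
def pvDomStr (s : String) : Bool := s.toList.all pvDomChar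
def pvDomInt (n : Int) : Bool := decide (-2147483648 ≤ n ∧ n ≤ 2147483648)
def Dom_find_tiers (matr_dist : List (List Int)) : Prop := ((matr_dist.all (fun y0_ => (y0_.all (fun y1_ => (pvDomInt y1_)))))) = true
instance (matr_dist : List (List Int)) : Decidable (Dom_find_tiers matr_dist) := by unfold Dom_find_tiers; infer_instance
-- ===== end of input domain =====

-- B replaces A's incremental get-then-insert-or-append dict building with a per-row comprehension
-- (dedup the values in first-appearance order, then one scan per distinct value); objective: simpler.

-- ===== PORT A =====
-- A: for i in range(len(matr_dist)): build tiers by get/insert-or-append over j in range(len(row)); append tiers.items.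
def find_tiers (matr_dist : List (List Int)) : List (List (Int × List Int)) :=
  (PySem.List.pyRange 0 (PySem.List.len matr_dist) 1).foldl
    (fun result i =>
      let row := PySem.List.pyGetD matr_dist i []
      let tiers := (PySem.List.pyRange 0 (PySem.List.len row) 1).foldl
        (fun d j =>
          let v := PySem.List.pyGetD row j 0
          if d.get? v = none then d.insert v [j + 1]
          else d.modify v [] (fun l => l ++ [j + 1]))
        PySem.Dict.empty
      result ++ [tiers.items])
    []

-- ===== PORT B =====
-- B: row comprehension — distinct values (first-appearance order), then collect indices per value.
def find_tiers_alt (matr_dist : List (List Int)) : List (List (Int × List Int)) :=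
  matr_dist.map (fun row =>
    (PySem.List.dedup row).map (fun v =>
      (v, ((PySem.List.enumerate row 0).filter (fun p => p.2 == v)).map (fun p => p.1 + 1))))

-- ===== PRECONDITION & SPEC =====
def Spec_find_tiers (matr_dist : List (List Int)) (out : List (List (Int × List Int))) : Prop := out = find_tiers_alt matr_dist
instance (matr_dist : List (List Int)) (out : List (List (Int × List Int))) : Decidable (Spec_find_tiers matr_dist out) := by unfold Spec_find_tiers; infer_instance

-- ===== CLAIM (what is proved, stated in full; the proofs are below) =====
def Claim_equal_find_tiers : Prop := ∀ (matr_dist : List (List Int)), Dom_find_tiers matr_dist → Spec_find_tiers matr_dist (find_tiers matr_dist)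

-- ===== LEMMAS AND PROOFS =====

-- A's branching step is the uniform append-modify step.
theorem step_eq_modify (d : PySem.Dict Int (List Int)) (p : Int × Int) :
    (if d.get? p.2 = none then d.insert p.2 [p.1 + 1]
     else d.modify p.2 [] (fun l => l ++ [p.1 + 1]))
      = d.modify p.2 [] (fun l => l ++ [p.1 + 1]) := by
  split_ifs with h
  · show d.insert p.2 [p.1 + 1] = d.insert p.2 (d.getD p.2 [] ++ [p.1 + 1])
    rw [PySem.Dict.getD_of_get?_eq_none d [] h, List.nil_append]
  · rfl

-- A's inner loop, rewritten as the standard grouping fold over swapped (value, index+1) pairs.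
theorem inner_eq (row : List Int) :
    ((PySem.List.pyRange 0 (PySem.List.len row) 1).foldl
        (fun d j =>
          let v := PySem.List.pyGetD row j 0
          if d.get? v = none then d.insert v [j + 1]
          else d.modify v [] (fun l => l ++ [j + 1]))
        PySem.Dict.empty)
      = ((PySem.List.enumerate row 0).map (fun p => (p.2, p.1 + 1))).foldl
          (fun d p => d.modify p.1 [] (fun l => l ++ [p.2])) PySem.Dict.empty := by
  conv_rhs => rw [List.foldl_map, PySem.List.enumerate_eq_map_pyRange row (0 : Int), List.foldl_map]
  apply PySem.List.foldl_congr_mem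
  intro acc j _
  exact step_eq_modify acc (j, PySem.List.pyGetD row j 0)

theorem row_items_eq (row : List Int) :
    (((PySem.List.enumerate row 0).map (fun p => (p.2, p.1 + 1))).foldl
        (fun d p => d.modify p.1 [] (fun l => l ++ [p.2])) PySem.Dict.empty).items
      = (PySem.List.dedup row).map (fun v =>
          (v, ((PySem.List.enumerate row 0).filter (fun p => p.2 == v)).map (fun p => p.1 + 1))) := by
  set M : List (Int × Int) := (PySem.List.enumerate row 0).map (fun p => (p.2, p.1 + 1)) with hM
  set D := M.foldl (fun d p => d.modify p.1 [] (fun l => l ++ [p.2])) PySem.Dict.empty with hD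
  have hnd : D.keys.Nodup := by
    rw [hD]
    exact PySem.Dict.nodup_keys_foldl_modify_key M Prod.fst [] (fun _ p l => l ++ [p.2])
      PySem.Dict.empty PySem.Dict.nodup_keys_empty
  have hkeys : D.keys = PySem.List.dedup row := by
    rw [hD, PySem.Dict.keys_foldl_modify_key]
    have : M.map Prod.fst = row := by
      rw [hM, List.map_map]
      exact PySem.List.map_snd_enumerate row 0
    rw [this]
    simp [PySem.Dict.keys, PySem.Dict.empty, PySem.Set.update_nil_left,
      PySem.List.dedup_eq_ofList]
  have hgetD : ∀ v : Int, D.getD v []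
      = ((PySem.List.enumerate row 0).filter (fun p => p.2 == v)).map (fun p => p.1 + 1) := by
    intro v
    rw [hD, PySem.Dict.getD_foldl_modify_append, PySem.Dict.getD_empty, List.nil_append, hM,
      List.filter_map, List.map_map]
    rfl
  rw [PySem.Dict.items_eq_map_keys D hnd [], hkeys]
  exact List.map_congr_left (fun v _ => by rw [hgetD v])

-- A's outer append-accumulator loop over row indices is a map over the rows.
theorem outer_eq (m : List (List Int)) (g : List Int → List (Int × List Int)) :
    (PySem.List.pyRange 0 (PySem.List.len m) 1).foldl
        (fun result i => result ++ [g (PySem.List.pyGetD m i [])]) []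
      = m.map g := by
  calc (PySem.List.pyRange 0 (PySem.List.len m) 1).foldl
        (fun result i => result ++ [g (PySem.List.pyGetD m i [])]) []
      = (PySem.List.enumerate m).foldl
          (fun result p => result ++ [g (PySem.List.pyGetD m p.1 [])]) [] := by
        rw [PySem.List.enumerate_eq_map_pyRange m ([] : List Int), List.foldl_map]
    _ = (PySem.List.enumerate m).foldl (fun result p => result ++ [g p.2]) [] := by
        apply PySem.List.foldl_congr_mem
        intro acc p hp
        rcases (PySem.List.mem_enumerate_iff m 0 p).mp hp with ⟨k, hk, rfl⟩
        simp [PySem.List.pyGetD_natCast, List.getD_eq_getElem?_getD, hk]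
    _ = m.map g := by
        rw [PySem.List.foldl_append_eq_flatMap, List.nil_append]
        calc (PySem.List.enumerate m).flatMap (fun p => [g p.2])
            = ((PySem.List.enumerate m).map (·.2)).flatMap (fun r => [g r]) := by
              rw [List.flatMap_map]
          _ = m.flatMap (fun r => [g r]) := by rw [PySem.List.map_snd_enumerate]
          _ = m.map g := by
              induction m with
              | nil => rfl
              | cons a t ih => simp only [List.flatMap_cons, List.map_cons, ih,
                  List.singleton_append]

-- ===== VERDICT (by name: the statement is the Claim_ definition above) =====
theorem find_tiers_spec : Claim_equal_find_tiers := by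
  intro m _
  show find_tiers m = find_tiers_alt m
  have h := outer_eq m (fun row =>
    ((PySem.List.pyRange 0 (PySem.List.len row) 1).foldl
      (fun d j =>
        let v := PySem.List.pyGetD row j 0
        if d.get? v = none then d.insert v [j + 1]
        else d.modify v [] (fun l => l ++ [j + 1]))
      PySem.Dict.empty).items)
  refine Eq.trans h ?_
  apply List.map_congr_left
  intro row _
  rw [inner_eq, row_items_eq]
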